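-- pv_equiv track=rewrite | github.com/judyladella/NTP-Stats | collect_ntp_latency.py | parse_ping_summary
-- ===== SOURCE A (Python) =====
-- from typing import Dict, List, Optional, Tuple
--
-- def parse_ping_summary(text: str) -> Tuple[Optional[str], Optional[str], Optional[str]]:
--     # Extract summary metrics from Linux ping output:
--     # avg RTT (ms), mdev (ms) (a measure of RTT variability; often used as "jitter" for ICMP), packet loss (%)
--
--     # We want structured CSV/JSON metrics rather than raw ping logs.
--
--     # Typical ping -q output includes lines like:
--     # "5 packets transmitted, 5 received, 0% packet loss, time 4006ms"
--     # "rtt min/avg/max/mdev = 0.120/0.250/0.400/0.050 ms"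
--
--     # If ping fails (DNS, blocked ICMP), those lines may not exist.
--     # In that case we return (None, None, None).
--
--     # RETURNS (avg, mdev, loss) strings or None if not found.
--
--     avg = None
--     mdev = None
--     loss = None
--
--     for line in text.splitlines():
--         if "packet loss" in line:
--             parts = [p.strip() for p in line.split(",")]
--             for p in parts:
--                 if "packet loss" in p:
--                     loss = p.split()[0].replace("%", "")
--                     break
--
--         if line.startswith("rtt ") or "round-trip" in line:
--             rhs = line.split("=")[-1].strip()
--             nums = rhs.split()[0].split("/")
--             if len(nums) >= 4:
--                 avg = nums[1]
--                 mdev = nums[3]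
--
--     return avg, mdev, loss
-- ===== SOURCE B (Python) =====
-- from typing import Optional, Tuple
--
--
-- def _loss_of(line: str) -> Optional[str]:
--     # loss figure of one line, or None if the line has none
--     if "packet loss" not in line:
--         return None
--     for part in line.split(","):
--         part = part.strip()
--         if "packet loss" in part:
--             return part.split()[0].replace("%", "")
--     return None
--
--
-- def _rtt_of(line: str) -> Optional[Tuple[str, str]]:
--     # (avg, mdev) of one rtt/round-trip line, or None if the line has none
--     if not (line.startswith("rtt ") or "round-trip" in line):
--         return None
--     fields = line.rsplit("=", 1)[-1].strip().split()
--     if not fields: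
--         return None
--     nums = fields[0].split("/")
--     if len(nums) >= 4:
--         return nums[1], nums[3]
--     return None
--
--
-- def parse_ping_summary(text: str) -> Tuple[Optional[str], Optional[str], Optional[str]]:
--     # Scan the lines back to front: the last line carrying each metric wins.
--     lines = text.splitlines()
--     loss = next((v for v in map(_loss_of, reversed(lines)) if v is not None), None)
--     rtt = next((v for v in map(_rtt_of, reversed(lines)) if v is not None), None)
--     avg, mdev = rtt if rtt is not None else (None, None)
--     return avg, mdev, loss
-- ===== Notes on version B (the rewrite author's own statement) =====
-- stated objective: idiomatic
-- what changed: A's single forward sweep with three mutable last-match-wins variables is replaced by two pure per-line extractor helpers combined with a back-to-front first-match search (next over reversed lines), so no overwrite state is carried.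
-- crash fix: On text containing an 'rtt '/'round-trip' line whose part after the last '=' is empty or all whitespace, A raises IndexError on rhs.split()[0]; B returns the result computed from the remaining lines (e.g. (None, None, None)). — e.g. on parse_ping_summary("rtt ="): A raises IndexError, B returns (none, none, none)
import Mathlib
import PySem

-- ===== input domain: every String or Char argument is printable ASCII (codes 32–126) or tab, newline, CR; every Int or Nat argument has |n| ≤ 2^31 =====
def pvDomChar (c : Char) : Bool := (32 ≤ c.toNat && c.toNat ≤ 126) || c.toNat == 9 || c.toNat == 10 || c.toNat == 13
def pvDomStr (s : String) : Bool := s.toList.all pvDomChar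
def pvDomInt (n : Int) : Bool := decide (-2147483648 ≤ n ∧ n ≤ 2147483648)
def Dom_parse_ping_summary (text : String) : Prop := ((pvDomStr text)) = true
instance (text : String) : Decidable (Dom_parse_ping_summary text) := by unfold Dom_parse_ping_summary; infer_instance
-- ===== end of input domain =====

-- B replaces A's forward sweep with mutable last-match-wins state by pure per-line
-- extractors plus a back-to-front first-match search (idiomatic; same cost).

-- ===== PORT A =====
def pvPacketLoss : List Char := "packet loss".toList
def pvRttSp : List Char := "rtt ".toList
def pvRoundTrip : List Char := "round-trip".toList

-- inner loop: 'for p in parts: if "packet loss" in p: loss = p.split()[0].replace("%",""); break'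
-- (p.split() is never empty when the guard holds, so headD [] is never the IndexError case)
def pvA_partsLoop : List (List Char) → Option (List Char) → Option (List Char)
  | [], loss => loss
  | p :: rest, loss =>
    if PySem.Chars.isIn pvPacketLoss p then
      some (PySem.Chars.replace ((PySem.Chars.split₀ p).headD []) ['%'] [])
    else pvA_partsLoop rest loss

-- the 'for line in text.splitlines()' loop over the state (avg, mdev, loss)
-- (rhs.split()[0]: where Python raises IndexError — split₀ rhs = [] — the input is outside Pre_)
def pvA_loop : List (List Char) → Option (List Char) → Option (List Char) → Option (List Char) →
    Option (List Char) × Option (List Char) × Option (List Char)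
  | [], avg, mdev, loss => (avg, mdev, loss)
  | line :: rest, avg, mdev, loss =>
    let loss' := if PySem.Chars.isIn pvPacketLoss line then
        pvA_partsLoop ((PySem.Chars.splitOn line [',']).map PySem.Chars.strip) loss
      else loss
    if PySem.Chars.startswith line pvRttSp || PySem.Chars.isIn pvRoundTrip line then
      let rhs := PySem.Chars.strip ((PySem.Chars.splitOn line ['=']).getLastD [])
      let nums := PySem.Chars.splitOn ((PySem.Chars.split₀ rhs).headD []) ['/']
      if 4 ≤ nums.length then
        pvA_loop rest (some (nums.getD 1 [])) (some (nums.getD 3 [])) loss'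
      else
        pvA_loop rest avg mdev loss'
    else
      pvA_loop rest avg mdev loss'

def parse_ping_summary (text : String) : Option String × Option String × Option String :=
  let r := pvA_loop ((PySem.Str.splitlines text).map String.toList) none none none
  (r.1.map String.ofList, r.2.1.map String.ofList, r.2.2.map String.ofList)

-- ===== PORT B =====
def pvB_lossParts : List (List Char) → Option (List Char)
  | [] => none
  | p :: rest =>
    let q := PySem.Chars.strip p
    if PySem.Chars.isIn pvPacketLoss q then
      some (PySem.Chars.replace ((PySem.Chars.split₀ q).headD []) ['%'] [])
    else pvB_lossParts rest

def pvB_lossOf (line : List Char) : Option (List Char) :=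
  if PySem.Chars.isIn pvPacketLoss line then pvB_lossParts (PySem.Chars.splitOn line [',']) else none

-- line.rsplit("=", 1)[-1] is exactly the segment after the last '=': the last piece of splitOn '='
def pvB_rttOf (line : List Char) : Option (List Char × List Char) :=
  if PySem.Chars.startswith line pvRttSp || PySem.Chars.isIn pvRoundTrip line then
    match PySem.Chars.split₀ (PySem.Chars.strip ((PySem.Chars.splitOn line ['=']).getLastD [])) with
    | [] => none
    | f :: _ =>
      let nums := PySem.Chars.splitOn f ['/']
      if 4 ≤ nums.length then some (nums.getD 1 [], nums.getD 3 []) else none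
  else none

-- next((v for v in map(f, ls) if v is not None), None)
def pvB_first {α : Type} (f : List Char → Option α) : List (List Char) → Option α
  | [] => none
  | l :: rest =>
    match f l with
    | some v => some v
    | none => pvB_first f rest

def parse_ping_summary_alt (text : String) : Option String × Option String × Option String :=
  let lines := ((PySem.Str.splitlines text).map String.toList).reverse
  let loss := pvB_first pvB_lossOf lines
  let rtt := pvB_first pvB_rttOf lines
  ((rtt.map (·.1)).map String.ofList, (rtt.map (·.2)).map String.ofList, loss.map String.ofList)

-- ===== PRECONDITION & SPEC =====
-- Pre_ excludes exactly the inputs where Python A raises IndexError: an 'rtt '/'round-trip'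
-- line whose part after the last '=' is empty or all whitespace (rhs.split()[0] on []).
def Pre_parse_ping_summary (text : String) : Prop :=
  ∀ line ∈ (PySem.Str.splitlines text).map String.toList,
    (PySem.Chars.startswith line pvRttSp || PySem.Chars.isIn pvRoundTrip line) = true →
      PySem.Chars.strip ((PySem.Chars.splitOn line ['=']).getLastD []) ≠ []
instance (text : String) : Decidable (Pre_parse_ping_summary text) := by
  unfold Pre_parse_ping_summary; infer_instance

def pvWitness_parse_ping_summary : String :=
  "5 packets transmitted, 5 received, 0% packet loss, time 4006ms\nrtt min/avg/max/mdev = 0.120/0.250/0.400/0.050 ms"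

-- On text with an 'rtt '/'round-trip' line whose part after the last '=' is all whitespace,
-- A raises IndexError; B returns the result computed from the remaining lines.
def Raises_parse_ping_summary (text : String) : Prop :=
  ∃ line ∈ (PySem.Str.splitlines text).map String.toList,
    (PySem.Chars.startswith line pvRttSp || PySem.Chars.isIn pvRoundTrip line) = true ∧
      PySem.Chars.strip ((PySem.Chars.splitOn line ['=']).getLastD []) = []
instance (text : String) : Decidable (Raises_parse_ping_summary text) := by
  unfold Raises_parse_ping_summary; infer_instance

def pvRaiseWitness_parse_ping_summary : String := "rtt ="
def pvRaiseWitnessOut_parse_ping_summary : Option String × Option String × Option String :=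
  (none, none, none)

def Spec_parse_ping_summary (text : String) (out : Option String × Option String × Option String) : Prop := out = parse_ping_summary_alt text
instance (text : String) (out : Option String × Option String × Option String) : Decidable (Spec_parse_ping_summary text out) := by unfold Spec_parse_ping_summary; infer_instance

-- ===== CLAIM (what is proved, stated in full; the proofs are below) =====
def Claim_equal_parse_ping_summary : Prop := ∀ (text : String), Dom_parse_ping_summary text → Pre_parse_ping_summary text → Spec_parse_ping_summary text (parse_ping_summary text)
-- crash-fix claim, proved below as theorem parse_ping_summary_raises
def Claim_raises_parse_ping_summary : Prop := (∀ (text : String), Dom_parse_ping_summary text → Raises_parse_ping_summary text → ¬ Pre_parse_ping_summary text) ∧ (Dom_parse_ping_summary (pvRaiseWitness_parse_ping_summary) ∧ Raises_parse_ping_summary (pvRaiseWitness_parse_ping_summary) ∧ parse_ping_summary_alt (pvRaiseWitness_parse_ping_summary) = pvRaiseWitnessOut_parse_ping_summary)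

-- ===== LEMMAS AND PROOFS =====

-- A's inner parts loop over already-stripped parts equals B's (strip-inline) scan, seeded with the old loss
lemma pvA_partsLoop_eq (ps : List (List Char)) (loss : Option (List Char)) :
    pvA_partsLoop (ps.map PySem.Chars.strip) loss =
      match pvB_lossParts ps with
      | some v => some v
      | none => loss := by
  induction ps with
  | nil => simp [pvA_partsLoop, pvB_lossParts]
  | cons p rest ih =>
    simp only [List.map_cons, pvA_partsLoop, pvB_lossParts]
    by_cases h : PySem.Chars.isIn pvPacketLoss (PySem.Chars.strip p) = true
    · simp [h]
    · simp only [Bool.not_eq_true] at h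
      simp [h, ih]

-- one step of A's loop, phrased through B's per-line extractors
lemma pvA_loop_step (line : List Char) (rest : List (List Char))
    (avg mdev loss : Option (List Char)) :
    pvA_loop (line :: rest) avg mdev loss =
      pvA_loop rest
        (match pvB_rttOf line with | some r => some r.1 | none => avg)
        (match pvB_rttOf line with | some r => some r.2 | none => mdev)
        (match pvB_lossOf line with | some v => some v | none => loss) := by
  have hloss :
      (if PySem.Chars.isIn pvPacketLoss line then
          pvA_partsLoop ((PySem.Chars.splitOn line [',']).map PySem.Chars.strip) loss
        else loss) =
        (match pvB_lossOf line with | some v => some v | none => loss) := by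
    unfold pvB_lossOf
    by_cases h : PySem.Chars.isIn pvPacketLoss line = true
    · simp [h, pvA_partsLoop_eq]
    · simp only [Bool.not_eq_true] at h
      simp [h]
  simp only [pvA_loop, hloss]
  unfold pvB_rttOf
  by_cases hg : (PySem.Chars.startswith line pvRttSp || PySem.Chars.isIn pvRoundTrip line) = true
  · simp only [hg, if_true]
    cases hs : PySem.Chars.split₀ (PySem.Chars.strip ((PySem.Chars.splitOn line ['=']).getLastD [])) with
    | nil =>
      -- rhs has no token: Python A would raise here (outside Pre_); the port keeps avg/mdev
      simp only [List.headD_nil]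
      rw [show PySem.Chars.splitOn ([] : List Char) ['/'] = [[]] from rfl]
      simp
    | cons f fs =>
      simp only [List.headD_cons]
      by_cases h4 : 4 ≤ (PySem.Chars.splitOn f ['/']).length
      · simp [h4]
      · simp [h4]
  · simp only [Bool.not_eq_true] at hg
    simp [hg]

-- first-match over xs ++ [x]
lemma pvB_first_append {α : Type} (f : List Char → Option α) (xs : List (List Char)) (x : List Char) :
    pvB_first f (xs ++ [x]) =
      match pvB_first f xs with
      | some v => some v
      | none => f x := by
  induction xs with
  | nil => cases h : f x <;> simp [pvB_first, h]
  | cons y ys ih =>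
    simp only [List.cons_append, pvB_first, ih]
    cases f y <;> simp

-- the whole forward loop equals the two backward first-match searches
lemma pvA_loop_eq (lines : List (List Char)) :
    ∀ avg mdev loss : Option (List Char),
    pvA_loop lines avg mdev loss =
      ((match pvB_first pvB_rttOf lines.reverse with | some r => some r.1 | none => avg),
       (match pvB_first pvB_rttOf lines.reverse with | some r => some r.2 | none => mdev),
       (match pvB_first pvB_lossOf lines.reverse with | some v => some v | none => loss)) := by
  induction lines with
  | nil => intro avg mdev loss; simp [pvA_loop, pvB_first]
  | cons line rest ih =>
    intro avg mdev loss
    rw [pvA_loop_step, ih]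
    simp only [List.reverse_cons, pvB_first_append]
    cases h1 : pvB_first pvB_rttOf rest.reverse <;>
      cases h2 : pvB_first pvB_lossOf rest.reverse <;> simp

-- ===== VERDICT (by name: the statement is the Claim_ definition above) =====
theorem parse_ping_summary_spec : Claim_equal_parse_ping_summary := by
  intro text _ _
  unfold Spec_parse_ping_summary parse_ping_summary parse_ping_summary_alt
  rw [pvA_loop_eq]
  cases h1 : pvB_first pvB_rttOf ((PySem.Str.splitlines text).map String.toList).reverse <;>
    cases h2 : pvB_first pvB_lossOf ((PySem.Str.splitlines text).map String.toList).reverse <;>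
      simp only [h1, h2, Option.map_some, Option.map_none]

theorem parse_ping_summary_raises : Claim_raises_parse_ping_summary := by
  unfold Claim_raises_parse_ping_summary
  constructor
  · intro text _ hr hpre
    obtain ⟨line, hmem, hg, hstrip⟩ := hr
    exact hpre line hmem hg hstrip
  · refine ⟨by decide, by decide, by decide⟩

-- self-check: the raise witness indeed lies outside Pre_ (via parse_ping_summary_raises)
theorem pvRaiseWitness_outside_ok : ¬ Pre_parse_ping_summary pvRaiseWitness_parse_ping_summary :=
  parse_ping_summary_raises.1 _ (by decide) (by decide)
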